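-- pv_equiv track=rewrite | github.com/mohammad29282928/noori_services | noori/app1/view/score_utils.py | map_to_segment
-- ===== SOURCE A (Python) =====
-- maps_11 = {
--     'At risk': [151, 251, 152, 252, 142, 242, 143, 243, 144, 244, 134, 234, 124,
--                 224, 145, 245, 135, 235, 125, 225, 115, 215],
--     'Potantial loyalist': [351, 451, 551, 341, 441, 541, 431, 531, 352, 452, 552,
--                 342, 442,542, 332, 432, 532, 333, 433, 533],
--     'Lost': [141, 131, 121, 111, 132, 122, 112, 133, 123, 113, 114 ],
--     'Hibernating': [241, 231, 221, 211, 232, 222, 212, 233, 223, 213, 214],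
--     'About to sleep': [331, 321, 311, 322, 312, 323, 313],
--     'New Customer':[421, 411, 521, 511, 422, 412, 522, 512],
--     'Promising': [423, 413, 523, 513, 424, 414, 524, 514, 314, 325, 315, 425, 415, 525, 515],
--     'Loyal': [353, 453, 553, 343, 443, 543, 354, 344, 444, 355, 345],
--     'Need Attention': [334, 434, 534, 324, 335, 435, 535],
--     'Champions': [454, 554, 544, 455, 555, 445, 545],
--     'Can not Lose them': [155, 255, 154, 254, 153, 253 ]
-- }
--
-- maps_6 = {
--     'At risk': [151, 251, 152, 252, 153, 253, 143, 243, 154, 254, 144, 244, 134, 234,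
--                 155, 255, 145, 245, 135, 235],
--     'Lost': [141, 131, 121, 111, 241, 231, 221, 211, 142, 132, 122, 112, 242, 232, 222, 212,
--              133, 123, 113, 233, 223, 213, 124, 224, 114, 214, 125, 225, 115, 215],
--     'Loyal': [351,451, 551, 341, 441, 541, 331, 431, 531, 352, 452, 552, 342, 442, 542, 332, 432, 532,
--             353, 343, 333, 433, 553, 443, 354, 344, 334, 434, 534, 335, 345, 435],
--     'New Customer':[321, 421, 521, 311, 411, 511, 322, 422, 522, 312, 412, 512, 323, 423, 523, 313, 413, 513 ],
--     'Promising': [324, 424, 524, 314, 414, 514, 325, 425, 525, 315, 415, 515],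
--     'Champions': [453, 553, 543, 454, 554, 444, 544, 355, 455, 555, 445, 545, 535]
-- }
--
-- maps_3 = {
--     'Lost': [151, 141, 131, 121, 111, 251, 241, 231, 221, 211, 152, 142, 132, 122, 112, 252, 242, 232, 222, 212,
--             153, 143, 133, 123, 113, 253, 243, 233, 223, 213, 154, 144, 134, 124, 114, 254, 244, 234, 224, 214,
--             155, 145, 135, 125, 115, 255, 245, 235, 225, 215],
--     'Champions': [351, 451, 551,341, 441, 541, 331, 431, 531, 352, 452, 552,342, 442, 542, 332, 432, 532,
--                 353, 453, 553,343, 443, 543, 333, 433, 533, 354, 454, 554,344, 444, 544, 334, 434, 534,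
--                 355, 455, 555,345, 445, 545, 335, 435, 535],
--     'New Customer':[321, 421, 521, 311, 411, 511, 322, 422, 522, 312, 412, 512, 323, 423, 523, 313, 413, 513,
--                 324, 424, 524, 314, 414, 514, 325, 425, 525, 315, 415, 515]
--
-- }
--
-- def map_to_segment(x, segments):
--     if segments == 11:
--         for k, v in maps_11.items():
--             if int(x) in v:
--                 return k
--     if segments == 6:
--         for k, v in maps_6.items():
--             if int(x) in v:
--                 return k
--     if segments == 3:
--         for k, v in maps_3.items():
--             if int(x) in v:
--                 return k
--     return None
-- ===== SOURCE B (Python) =====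
-- # Dense lookup tables indexed by RFM digits: x is split into digits r,f,m (1..5 each),
-- # idx = (r-1)*25+(f-1)*5+(m-1) indexes a flat 125-entry name table per segmentation.
-- # None entries mark codes no segment lists (e.g. 533 for segments=6).
--
-- _N11 = [
--     'Lost', 'Lost', 'Lost', 'Lost', 'At risk',
--     'Lost', 'Lost', 'Lost', 'At risk', 'At risk',
--     'Lost', 'Lost', 'Lost', 'At risk', 'At risk',
--     'Lost', 'At risk', 'At risk', 'At risk', 'At risk',
--     'At risk', 'At risk', 'Can not Lose them', 'Can not Lose them', 'Can not Lose them',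
--     'Hibernating', 'Hibernating', 'Hibernating', 'Hibernating', 'At risk',
--     'Hibernating', 'Hibernating', 'Hibernating', 'At risk', 'At risk',
--     'Hibernating', 'Hibernating', 'Hibernating', 'At risk', 'At risk',
--     'Hibernating', 'At risk', 'At risk', 'At risk', 'At risk',
--     'At risk', 'At risk', 'Can not Lose them', 'Can not Lose them', 'Can not Lose them',
--     'About to sleep', 'About to sleep', 'About to sleep', 'Promising', 'Promising',
--     'About to sleep', 'About to sleep', 'About to sleep', 'Need Attention', 'Promising',
--     'About to sleep', 'Potantial loyalist', 'Potantial loyalist', 'Need Attention', 'Need Attention',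
--     'Potantial loyalist', 'Potantial loyalist', 'Loyal', 'Loyal', 'Loyal',
--     'Potantial loyalist', 'Potantial loyalist', 'Loyal', 'Loyal', 'Loyal',
--     'New Customer', 'New Customer', 'Promising', 'Promising', 'Promising',
--     'New Customer', 'New Customer', 'Promising', 'Promising', 'Promising',
--     'Potantial loyalist', 'Potantial loyalist', 'Potantial loyalist', 'Need Attention', 'Need Attention',
--     'Potantial loyalist', 'Potantial loyalist', 'Loyal', 'Loyal', 'Champions',
--     'Potantial loyalist', 'Potantial loyalist', 'Loyal', 'Champions', 'Champions',
--     'New Customer', 'New Customer', 'Promising', 'Promising', 'Promising',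
--     'New Customer', 'New Customer', 'Promising', 'Promising', 'Promising',
--     'Potantial loyalist', 'Potantial loyalist', 'Potantial loyalist', 'Need Attention', 'Need Attention',
--     'Potantial loyalist', 'Potantial loyalist', 'Loyal', 'Champions', 'Champions',
--     'Potantial loyalist', 'Potantial loyalist', 'Loyal', 'Champions', 'Champions',
-- ]
-- _N6 = [
--     'Lost', 'Lost', 'Lost', 'Lost', 'Lost',
--     'Lost', 'Lost', 'Lost', 'Lost', 'Lost',
--     'Lost', 'Lost', 'Lost', 'At risk', 'At risk',
--     'Lost', 'Lost', 'At risk', 'At risk', 'At risk',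
--     'At risk', 'At risk', 'At risk', 'At risk', 'At risk',
--     'Lost', 'Lost', 'Lost', 'Lost', 'Lost',
--     'Lost', 'Lost', 'Lost', 'Lost', 'Lost',
--     'Lost', 'Lost', 'Lost', 'At risk', 'At risk',
--     'Lost', 'Lost', 'At risk', 'At risk', 'At risk',
--     'At risk', 'At risk', 'At risk', 'At risk', 'At risk',
--     'New Customer', 'New Customer', 'New Customer', 'Promising', 'Promising',
--     'New Customer', 'New Customer', 'New Customer', 'Promising', 'Promising',
--     'Loyal', 'Loyal', 'Loyal', 'Loyal', 'Loyal',
--     'Loyal', 'Loyal', 'Loyal', 'Loyal', 'Loyal',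
--     'Loyal', 'Loyal', 'Loyal', 'Loyal', 'Champions',
--     'New Customer', 'New Customer', 'New Customer', 'Promising', 'Promising',
--     'New Customer', 'New Customer', 'New Customer', 'Promising', 'Promising',
--     'Loyal', 'Loyal', 'Loyal', 'Loyal', 'Loyal',
--     'Loyal', 'Loyal', 'Loyal', 'Champions', 'Champions',
--     'Loyal', 'Loyal', 'Champions', 'Champions', 'Champions',
--     'New Customer', 'New Customer', 'New Customer', 'Promising', 'Promising',
--     'New Customer', 'New Customer', 'New Customer', 'Promising', 'Promising',
--     'Loyal', 'Loyal', None, 'Loyal', 'Champions',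
--     'Loyal', 'Loyal', 'Champions', 'Champions', 'Champions',
--     'Loyal', 'Loyal', 'Loyal', 'Champions', 'Champions',
-- ]
-- _N3 = [
--     'Lost', 'Lost', 'Lost', 'Lost', 'Lost',
--     'Lost', 'Lost', 'Lost', 'Lost', 'Lost',
--     'Lost', 'Lost', 'Lost', 'Lost', 'Lost',
--     'Lost', 'Lost', 'Lost', 'Lost', 'Lost',
--     'Lost', 'Lost', 'Lost', 'Lost', 'Lost',
--     'Lost', 'Lost', 'Lost', 'Lost', 'Lost',
--     'Lost', 'Lost', 'Lost', 'Lost', 'Lost',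
--     'Lost', 'Lost', 'Lost', 'Lost', 'Lost',
--     'Lost', 'Lost', 'Lost', 'Lost', 'Lost',
--     'Lost', 'Lost', 'Lost', 'Lost', 'Lost',
--     'New Customer', 'New Customer', 'New Customer', 'New Customer', 'New Customer',
--     'New Customer', 'New Customer', 'New Customer', 'New Customer', 'New Customer',
--     'Champions', 'Champions', 'Champions', 'Champions', 'Champions',
--     'Champions', 'Champions', 'Champions', 'Champions', 'Champions',
--     'Champions', 'Champions', 'Champions', 'Champions', 'Champions',
--     'New Customer', 'New Customer', 'New Customer', 'New Customer', 'New Customer',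
--     'New Customer', 'New Customer', 'New Customer', 'New Customer', 'New Customer',
--     'Champions', 'Champions', 'Champions', 'Champions', 'Champions',
--     'Champions', 'Champions', 'Champions', 'Champions', 'Champions',
--     'Champions', 'Champions', 'Champions', 'Champions', 'Champions',
--     'New Customer', 'New Customer', 'New Customer', 'New Customer', 'New Customer',
--     'New Customer', 'New Customer', 'New Customer', 'New Customer', 'New Customer',
--     'Champions', 'Champions', 'Champions', 'Champions', 'Champions',
--     'Champions', 'Champions', 'Champions', 'Champions', 'Champions',
--     'Champions', 'Champions', 'Champions', 'Champions', 'Champions',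
-- ]
--
-- def map_to_segment(x, segments):
--     x = int(x)
--     r, rem = divmod(x, 100)
--     f, m = divmod(rem, 10)
--     if not (1 <= r <= 5 and 1 <= f <= 5 and 1 <= m <= 5):
--         return None
--     idx = (r - 1) * 25 + (f - 1) * 5 + (m - 1)
--     if segments == 11:
--         return _N11[idx]
--     if segments == 6:
--         return _N6[idx]
--     if segments == 3:
--         return _N3[idx]
--     return None
-- ===== Notes on version B (the rewrite author's own statement) =====
-- stated objective: alternative
-- what changed: Replaces the per-call scan over every segment's code list with digit decomposition (r,f,m via divmod) indexing into three flat 125-entry name tables, so a call is a bounds check plus one list index.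
import Mathlib
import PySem

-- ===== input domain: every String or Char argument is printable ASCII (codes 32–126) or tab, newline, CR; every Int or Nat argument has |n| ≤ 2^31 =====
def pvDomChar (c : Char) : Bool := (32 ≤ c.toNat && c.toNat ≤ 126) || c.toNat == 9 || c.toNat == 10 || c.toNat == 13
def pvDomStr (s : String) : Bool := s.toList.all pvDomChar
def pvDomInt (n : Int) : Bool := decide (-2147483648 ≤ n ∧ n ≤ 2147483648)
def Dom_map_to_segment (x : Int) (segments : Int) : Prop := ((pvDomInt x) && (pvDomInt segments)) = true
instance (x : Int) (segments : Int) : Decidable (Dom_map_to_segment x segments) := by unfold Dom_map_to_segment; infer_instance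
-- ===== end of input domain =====

-- B replaces A's per-call scan over every segment's code list with digit decomposition
-- (r, f, m via divmod) indexing flat 125-entry name tables; objective: alternative O(1) lookup.

-- ===== PORT A =====
-- module data of A: the three segment maps (dict[str, list[int]] -> assoc lists)
def pvMaps11 : List (String × List Int) := [
  ("At risk", [151, 251, 152, 252, 142, 242, 143, 243, 144, 244, 134, 234, 124,
               224, 145, 245, 135, 235, 125, 225, 115, 215]),
  ("Potantial loyalist", [351, 451, 551, 341, 441, 541, 431, 531, 352, 452, 552,
               342, 442, 542, 332, 432, 532, 333, 433, 533]),
  ("Lost", [141, 131, 121, 111, 132, 122, 112, 133, 123, 113, 114]),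
  ("Hibernating", [241, 231, 221, 211, 232, 222, 212, 233, 223, 213, 214]),
  ("About to sleep", [331, 321, 311, 322, 312, 323, 313]),
  ("New Customer", [421, 411, 521, 511, 422, 412, 522, 512]),
  ("Promising", [423, 413, 523, 513, 424, 414, 524, 514, 314, 325, 315, 425, 415, 525, 515]),
  ("Loyal", [353, 453, 553, 343, 443, 543, 354, 344, 444, 355, 345]),
  ("Need Attention", [334, 434, 534, 324, 335, 435, 535]),
  ("Champions", [454, 554, 544, 455, 555, 445, 545]),
  ("Can not Lose them", [155, 255, 154, 254, 153, 253])]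

def pvMaps6 : List (String × List Int) := [
  ("At risk", [151, 251, 152, 252, 153, 253, 143, 243, 154, 254, 144, 244, 134, 234,
               155, 255, 145, 245, 135, 235]),
  ("Lost", [141, 131, 121, 111, 241, 231, 221, 211, 142, 132, 122, 112, 242, 232, 222, 212,
            133, 123, 113, 233, 223, 213, 124, 224, 114, 214, 125, 225, 115, 215]),
  ("Loyal", [351, 451, 551, 341, 441, 541, 331, 431, 531, 352, 452, 552, 342, 442, 542, 332, 432, 532,
             353, 343, 333, 433, 553, 443, 354, 344, 334, 434, 534, 335, 345, 435]),
  ("New Customer", [321, 421, 521, 311, 411, 511, 322, 422, 522, 312, 412, 512, 323, 423, 523, 313, 413, 513]),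
  ("Promising", [324, 424, 524, 314, 414, 514, 325, 425, 525, 315, 415, 515]),
  ("Champions", [453, 553, 543, 454, 554, 444, 544, 355, 455, 555, 445, 545, 535])]

def pvMaps3 : List (String × List Int) := [
  ("Lost", [151, 141, 131, 121, 111, 251, 241, 231, 221, 211, 152, 142, 132, 122, 112, 252, 242, 232, 222, 212,
            153, 143, 133, 123, 113, 253, 243, 233, 223, 213, 154, 144, 134, 124, 114, 254, 244, 234, 224, 214,
            155, 145, 135, 125, 115, 255, 245, 235, 225, 215]),
  ("Champions", [351, 451, 551, 341, 441, 541, 331, 431, 531, 352, 452, 552, 342, 442, 542, 332, 432, 532,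
                 353, 453, 553, 343, 443, 543, 333, 433, 533, 354, 454, 554, 344, 444, 544, 334, 434, 534,
                 355, 455, 555, 345, 445, 545, 335, 435, 535]),
  ("New Customer", [321, 421, 521, 311, 411, 511, 322, 422, 522, 312, 412, 512, 323, 423, 523, 313, 413, 513,
                    324, 424, 524, 314, 414, 514, 325, 425, 525, 315, 415, 515])]

-- A's loop: for k, v in maps.items(): if int(x) in v: return k  (falls through to None)
def pvScan (m : List (String × List Int)) (x : Int) : Option String :=
  match m with
  | [] => none
  | kv :: t => if kv.2.contains x then some kv.1 else pvScan t x

def map_to_segment (x : Int) (segments : Int) : Option String :=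
  if segments = 11 then pvScan pvMaps11 x
  else if segments = 6 then pvScan pvMaps6 x
  else if segments = 3 then pvScan pvMaps3 x
  else none

-- ===== PORT B =====
-- B's flat 125-entry name tables, indexed by (r-1)*25 + (f-1)*5 + (m-1)
def pvN11 : List (Option String) := [
  some "Lost", some "Lost", some "Lost", some "Lost", some "At risk",
  some "Lost", some "Lost", some "Lost", some "At risk", some "At risk",
  some "Lost", some "Lost", some "Lost", some "At risk", some "At risk",
  some "Lost", some "At risk", some "At risk", some "At risk", some "At risk",
  some "At risk", some "At risk", some "Can not Lose them", some "Can not Lose them", some "Can not Lose them",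
  some "Hibernating", some "Hibernating", some "Hibernating", some "Hibernating", some "At risk",
  some "Hibernating", some "Hibernating", some "Hibernating", some "At risk", some "At risk",
  some "Hibernating", some "Hibernating", some "Hibernating", some "At risk", some "At risk",
  some "Hibernating", some "At risk", some "At risk", some "At risk", some "At risk",
  some "At risk", some "At risk", some "Can not Lose them", some "Can not Lose them", some "Can not Lose them",
  some "About to sleep", some "About to sleep", some "About to sleep", some "Promising", some "Promising",
  some "About to sleep", some "About to sleep", some "About to sleep", some "Need Attention", some "Promising",
  some "About to sleep", some "Potantial loyalist", some "Potantial loyalist", some "Need Attention", some "Need Attention",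
  some "Potantial loyalist", some "Potantial loyalist", some "Loyal", some "Loyal", some "Loyal",
  some "Potantial loyalist", some "Potantial loyalist", some "Loyal", some "Loyal", some "Loyal",
  some "New Customer", some "New Customer", some "Promising", some "Promising", some "Promising",
  some "New Customer", some "New Customer", some "Promising", some "Promising", some "Promising",
  some "Potantial loyalist", some "Potantial loyalist", some "Potantial loyalist", some "Need Attention", some "Need Attention",
  some "Potantial loyalist", some "Potantial loyalist", some "Loyal", some "Loyal", some "Champions",
  some "Potantial loyalist", some "Potantial loyalist", some "Loyal", some "Champions", some "Champions",
  some "New Customer", some "New Customer", some "Promising", some "Promising", some "Promising",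
  some "New Customer", some "New Customer", some "Promising", some "Promising", some "Promising",
  some "Potantial loyalist", some "Potantial loyalist", some "Potantial loyalist", some "Need Attention", some "Need Attention",
  some "Potantial loyalist", some "Potantial loyalist", some "Loyal", some "Champions", some "Champions",
  some "Potantial loyalist", some "Potantial loyalist", some "Loyal", some "Champions", some "Champions"]

def pvN6 : List (Option String) := [
  some "Lost", some "Lost", some "Lost", some "Lost", some "Lost",
  some "Lost", some "Lost", some "Lost", some "Lost", some "Lost",
  some "Lost", some "Lost", some "Lost", some "At risk", some "At risk",
  some "Lost", some "Lost", some "At risk", some "At risk", some "At risk",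
  some "At risk", some "At risk", some "At risk", some "At risk", some "At risk",
  some "Lost", some "Lost", some "Lost", some "Lost", some "Lost",
  some "Lost", some "Lost", some "Lost", some "Lost", some "Lost",
  some "Lost", some "Lost", some "Lost", some "At risk", some "At risk",
  some "Lost", some "Lost", some "At risk", some "At risk", some "At risk",
  some "At risk", some "At risk", some "At risk", some "At risk", some "At risk",
  some "New Customer", some "New Customer", some "New Customer", some "Promising", some "Promising",
  some "New Customer", some "New Customer", some "New Customer", some "Promising", some "Promising",
  some "Loyal", some "Loyal", some "Loyal", some "Loyal", some "Loyal",
  some "Loyal", some "Loyal", some "Loyal", some "Loyal", some "Loyal",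
  some "Loyal", some "Loyal", some "Loyal", some "Loyal", some "Champions",
  some "New Customer", some "New Customer", some "New Customer", some "Promising", some "Promising",
  some "New Customer", some "New Customer", some "New Customer", some "Promising", some "Promising",
  some "Loyal", some "Loyal", some "Loyal", some "Loyal", some "Loyal",
  some "Loyal", some "Loyal", some "Loyal", some "Champions", some "Champions",
  some "Loyal", some "Loyal", some "Champions", some "Champions", some "Champions",
  some "New Customer", some "New Customer", some "New Customer", some "Promising", some "Promising",
  some "New Customer", some "New Customer", some "New Customer", some "Promising", some "Promising",
  some "Loyal", some "Loyal", none, some "Loyal", some "Champions",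
  some "Loyal", some "Loyal", some "Champions", some "Champions", some "Champions",
  some "Loyal", some "Loyal", some "Loyal", some "Champions", some "Champions"]

def pvN3 : List (Option String) := [
  some "Lost", some "Lost", some "Lost", some "Lost", some "Lost",
  some "Lost", some "Lost", some "Lost", some "Lost", some "Lost",
  some "Lost", some "Lost", some "Lost", some "Lost", some "Lost",
  some "Lost", some "Lost", some "Lost", some "Lost", some "Lost",
  some "Lost", some "Lost", some "Lost", some "Lost", some "Lost",
  some "Lost", some "Lost", some "Lost", some "Lost", some "Lost",
  some "Lost", some "Lost", some "Lost", some "Lost", some "Lost",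
  some "Lost", some "Lost", some "Lost", some "Lost", some "Lost",
  some "Lost", some "Lost", some "Lost", some "Lost", some "Lost",
  some "Lost", some "Lost", some "Lost", some "Lost", some "Lost",
  some "New Customer", some "New Customer", some "New Customer", some "New Customer", some "New Customer",
  some "New Customer", some "New Customer", some "New Customer", some "New Customer", some "New Customer",
  some "Champions", some "Champions", some "Champions", some "Champions", some "Champions",
  some "Champions", some "Champions", some "Champions", some "Champions", some "Champions",
  some "Champions", some "Champions", some "Champions", some "Champions", some "Champions",
  some "New Customer", some "New Customer", some "New Customer", some "New Customer", some "New Customer",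
  some "New Customer", some "New Customer", some "New Customer", some "New Customer", some "New Customer",
  some "Champions", some "Champions", some "Champions", some "Champions", some "Champions",
  some "Champions", some "Champions", some "Champions", some "Champions", some "Champions",
  some "Champions", some "Champions", some "Champions", some "Champions", some "Champions",
  some "New Customer", some "New Customer", some "New Customer", some "New Customer", some "New Customer",
  some "New Customer", some "New Customer", some "New Customer", some "New Customer", some "New Customer",
  some "Champions", some "Champions", some "Champions", some "Champions", some "Champions",
  some "Champions", some "Champions", some "Champions", some "Champions", some "Champions",
  some "Champions", some "Champions", some "Champions", some "Champions", some "Champions"]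

-- r, rem = divmod(x, 100); f, m = divmod(rem, 10); bounds check; one indexed access
def map_to_segment_alt (x : Int) (segments : Int) : Option String :=
  let r := PySem.Int.floordiv x 100
  let rem := PySem.Int.mod x 100
  let f := PySem.Int.floordiv rem 10
  let m := PySem.Int.mod rem 10
  if 1 ≤ r ∧ r ≤ 5 ∧ 1 ≤ f ∧ f ≤ 5 ∧ 1 ≤ m ∧ m ≤ 5 then
    -- idx is in [0, 124] here, so Python's _N[idx] is exactly this getD
    let idx := ((r - 1) * 25 + (f - 1) * 5 + (m - 1)).toNat
    if segments = 11 then pvN11.getD idx none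
    else if segments = 6 then pvN6.getD idx none
    else if segments = 3 then pvN3.getD idx none
    else none
  else none

-- ===== PRECONDITION & SPEC =====
def Spec_map_to_segment (x : Int) (segments : Int) (out : Option String) : Prop := out = map_to_segment_alt x segments
instance (x : Int) (segments : Int) (out : Option String) : Decidable (Spec_map_to_segment x segments out) := by unfold Spec_map_to_segment; infer_instance

-- ===== CLAIM (what is proved, stated in full; the proofs are below) =====
def Claim_equal_map_to_segment : Prop := ∀ (x : Int) (segments : Int), Dom_map_to_segment x segments → Spec_map_to_segment x segments (map_to_segment x segments)

-- ===== LEMMAS AND PROOFS =====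

-- digit bounds force 111 ≤ x ≤ 555
theorem alt_none_out (x segments : Int) (h : x < 111 ∨ 555 < x) :
    map_to_segment_alt x segments = none := by
  unfold map_to_segment_alt
  rw [if_neg]
  rintro ⟨hr1, hr5, hf1, hf5, hm1, hm5⟩
  have h100 : PySem.Int.floordiv x 100 * 100 + PySem.Int.mod x 100 = x :=
    PySem.Int.floordiv_mul_add_mod x 100
  have h10 : PySem.Int.floordiv (PySem.Int.mod x 100) 10 * 10
      + PySem.Int.mod (PySem.Int.mod x 100) 10 = PySem.Int.mod x 100 :=
    PySem.Int.floordiv_mul_add_mod (PySem.Int.mod x 100) 10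
  omega

theorem scan_none_of_bounds (m : List (String × List Int))
    (hb : ∀ kv ∈ m, ∀ c ∈ kv.2, (111:Int) ≤ c ∧ c ≤ 555)
    (x : Int) (h : x < 111 ∨ 555 < x) : pvScan m x = none := by
  induction m with
  | nil => rfl
  | cons kv t ih =>
    have hmem : x ∉ kv.2 := by
      intro hm
      have := hb kv (List.mem_cons_self ..) x hm
      omega
    have hc : kv.2.contains x = false := by
      simp [List.contains_eq_mem, hmem]
    simp only [pvScan, hc, Bool.false_eq_true, if_false]
    exact ih (fun kv' h' => hb kv' (List.mem_cons_of_mem _ h'))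

theorem alt_other (x segments : Int) (h11 : ¬ segments = 11) (h6 : ¬ segments = 6)
    (h3 : ¬ segments = 3) : map_to_segment_alt x segments = none := by
  unfold map_to_segment_alt
  simp [h11, h6, h3]

set_option maxHeartbeats 4000000 in
set_option maxRecDepth 100000 in
theorem key11 : ∀ n ∈ List.range 445,
    pvScan pvMaps11 (111 + (n:Int)) = map_to_segment_alt (111 + (n:Int)) 11 := by decide

set_option maxHeartbeats 4000000 in
set_option maxRecDepth 100000 in
theorem key6 : ∀ n ∈ List.range 445,
    pvScan pvMaps6 (111 + (n:Int)) = map_to_segment_alt (111 + (n:Int)) 6 := by decide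

set_option maxHeartbeats 4000000 in
set_option maxRecDepth 100000 in
theorem key3 : ∀ n ∈ List.range 445,
    pvScan pvMaps3 (111 + (n:Int)) = map_to_segment_alt (111 + (n:Int)) 3 := by decide

theorem eq11 (x : Int) : pvScan pvMaps11 x = map_to_segment_alt x 11 := by
  by_cases hx : 111 ≤ x ∧ x ≤ 555
  · have hn : x = 111 + ((x - 111).toNat : Int) := by omega
    rw [hn]
    exact key11 (x - 111).toNat (List.mem_range.mpr (by omega))
  · rw [scan_none_of_bounds pvMaps11 (by decide) x (by omega),
        alt_none_out x 11 (by omega)]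

theorem eq6 (x : Int) : pvScan pvMaps6 x = map_to_segment_alt x 6 := by
  by_cases hx : 111 ≤ x ∧ x ≤ 555
  · have hn : x = 111 + ((x - 111).toNat : Int) := by omega
    rw [hn]
    exact key6 (x - 111).toNat (List.mem_range.mpr (by omega))
  · rw [scan_none_of_bounds pvMaps6 (by decide) x (by omega),
        alt_none_out x 6 (by omega)]

theorem eq3 (x : Int) : pvScan pvMaps3 x = map_to_segment_alt x 3 := by
  by_cases hx : 111 ≤ x ∧ x ≤ 555
  · have hn : x = 111 + ((x - 111).toNat : Int) := by omega
    rw [hn]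
    exact key3 (x - 111).toNat (List.mem_range.mpr (by omega))
  · rw [scan_none_of_bounds pvMaps3 (by decide) x (by omega),
        alt_none_out x 3 (by omega)]

-- ===== VERDICT (by name: the statement is the Claim_ definition above) =====
theorem map_to_segment_spec : Claim_equal_map_to_segment := by
  intro x segments _
  unfold Spec_map_to_segment map_to_segment
  by_cases h11 : segments = 11
  · subst h11
    simpa using eq11 x
  · by_cases h6 : segments = 6
    · subst h6
      simpa [h11] using eq6 x
    · by_cases h3 : segments = 3
      · subst h3
        simpa [h11, h6] using eq3 x
      · simp [h11, h6, h3, alt_other]
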